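-- pv_equiv track=rewrite | github.com/tndus77/algorithm-solving | 프로그래머스/2/131127. 할인 행사/할인 행사.py | solution
-- ===== SOURCE A (Python) =====
-- def solution(want, number, discount):
--     from collections import Counter
--
--     answer = 0
--     days = 10
--     want_dict = dict(zip(want, number))
--
--     for start_day in range(len(discount) - days+1):
--         current_items = discount[start_day:start_day+days]
--         current_counter = Counter(current_items)
--
--         isPossible = True
--         for item, count in want_dict.items():
--             if current_counter[item] < count:
--                 isPossible = False
--         if isPossible:
--             answer += 1
--
--
--     return answer
-- ===== SOURCE B (Python) =====
-- def solution(want, number, discount):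
--     req = dict(zip(want, number))
--     if len(discount) < 10:
--         return 0
--     ok = [True] * (len(discount) - 9)
--     for item, need in req.items():
--         pref = [0]
--         c = 0
--         for d in discount:
--             c += (d == item)
--             pref.append(c)
--         ok = [o and b - a >= need for o, (a, b) in zip(ok, zip(pref, pref[10:]))]
--     return sum(ok)
-- ===== Notes on version B (the rewrite author's own statement) =====
-- stated objective: alternative
-- what changed: A rebuilds a Counter of every 10-day window and rescans all requirements per window; B makes one prefix-count pass over discount per distinct wanted item and intersects per-window satisfaction lists, so no per-window Counter is ever built.
import Mathlib
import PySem

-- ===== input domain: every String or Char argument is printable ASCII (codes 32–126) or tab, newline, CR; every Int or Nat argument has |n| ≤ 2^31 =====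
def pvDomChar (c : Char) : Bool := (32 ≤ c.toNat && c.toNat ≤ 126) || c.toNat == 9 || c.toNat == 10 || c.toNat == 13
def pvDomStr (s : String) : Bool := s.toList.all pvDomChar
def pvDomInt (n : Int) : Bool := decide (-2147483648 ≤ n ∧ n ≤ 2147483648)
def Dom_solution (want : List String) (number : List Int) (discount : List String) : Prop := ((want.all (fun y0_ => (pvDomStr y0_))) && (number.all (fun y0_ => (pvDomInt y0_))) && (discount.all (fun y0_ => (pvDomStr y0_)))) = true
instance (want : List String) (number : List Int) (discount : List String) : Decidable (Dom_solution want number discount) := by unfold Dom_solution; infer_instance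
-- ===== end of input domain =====

-- B replaces A's per-window Counter rebuild by one prefix-count pass per distinct wanted item,
-- intersected into a per-window satisfaction list (objective: alternative algorithm).

-- ===== PORT A =====
def solution (want : List String) (number : List Int) (discount : List String) : Int :=
  let want_dict := PySem.Dict.ofList (want.zip number)
  (PySem.List.pyRange 0 ((discount.length : Int) - 10 + 1) 1).foldl
    (fun answer start_day =>
      let current_items := PySem.List.slice discount (some start_day) (some (start_day + 10))
      let current_counter := PySem.Dict.counter current_items
      let isPossible := want_dict.items.foldl
        (fun isPossible p => if current_counter.getD p.1 0 < p.2 then false else isPossible) true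
      if isPossible then answer + 1 else answer) 0

-- ===== PORT B =====
-- Source B's inner pass: running prefix counts of item over discount; s.2 carries pref[-1]
def prefCounts (item : String) (discount : List String) : List Int × Int :=
  discount.foldl (fun s d =>
    let c := s.2 + (if d == item then 1 else 0)
    (s.1 ++ [c], c)) ([0], 0)

def solution_alt (want : List String) (number : List Int) (discount : List String) : Int :=
  let req := PySem.Dict.ofList (want.zip number)
  if discount.length < 10 then 0
  else
    let ok0 := List.replicate (discount.length - 9) true
    let ok := req.items.foldl (fun ok p =>
      let pref := (prefCounts p.1 discount).1
      (ok.zip (pref.zip (pref.drop 10))).map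
        (fun q => q.1 && decide (p.2 ≤ q.2.2 - q.2.1))) ok0
    (ok.map (fun o => if o then (1 : Int) else 0)).sum

-- ===== PRECONDITION & SPEC =====
def Spec_solution (want : List String) (number : List Int) (discount : List String) (out : Int) : Prop := out = solution_alt want number discount
instance (want : List String) (number : List Int) (discount : List String) (out : Int) : Decidable (Spec_solution want number discount out) := by unfold Spec_solution; infer_instance

-- ===== CLAIM (what is proved, stated in full; the proofs are below) =====
def Claim_equal_solution : Prop := ∀ (want : List String) (number : List Int) (discount : List String), Dom_solution want number discount → Spec_solution want number discount (solution want number discount)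

-- ===== LEMMAS AND PROOFS =====

theorem count_snoc (item x : String) (l : List String) :
    ((l ++ [x]).count item : Int) = (l.count item : Int) + (if x == item then 1 else 0) := by
  rw [List.count_append]
  push_cast
  simp [List.count_singleton]

-- the prefix pass characterised: pref[i] = count of item among the first i days
theorem prefCounts_eq (item : String) (l : List String) :
    prefCounts item l =
      ((List.range (l.length + 1)).map (fun i => ((l.take i).count item : Int)),
       (l.count item : Int)) := by
  unfold prefCounts
  induction l using List.reverseRecOn with
  | nil => simp
  | append_singleton l x ih =>
    rw [List.foldl_append, ih]
    simp only [List.foldl_cons, List.foldl_nil, Prod.mk.injEq]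
    refine ⟨?_, (count_snoc item x l).symm⟩
    rw [List.length_append, List.length_singleton, List.range_succ (n := l.length + 1),
      List.map_append, List.map_singleton]
    congr 1
    · apply List.map_congr_left
      intro i hi
      simp only [List.mem_range] at hi
      rw [List.take_append_of_le_length (by omega)]
    · rw [List.take_of_length_le (by simp), count_snoc]

-- difference of adjacent prefix counts is the window count
theorem windowCount (item : String) (l : List String) (s : Nat) :
    ((l.take (10 + s)).count item : Int) - ((l.take s).count item : Int)
      = (((l.drop s).take 10).count item : Int) := by
  have : 10 + s = s + 10 := by omega
  rw [this, List.take_add, List.count_append]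
  push_cast; ring

-- one item update of the ok list, as a map over window starts
theorem okStep_eq (m : Nat) (h : Nat → Bool) (item : String) (need : Int) (discount : List String)
    (hm : m + 9 ≤ discount.length) :
    (((List.range m).map h).zip
        (((prefCounts item discount).1).zip (((prefCounts item discount).1).drop 10))).map
      (fun q => q.1 && decide (need ≤ q.2.2 - q.2.1)) =
    (List.range m).map (fun s =>
      h s && decide (need ≤ (((discount.drop s).take 10).count item : Int))) := by
  rw [prefCounts_eq]
  apply List.ext_getElem
  · simp; omega
  · intro i hi1 hi2
    simp only [List.getElem_map, List.getElem_zip, List.getElem_drop, List.getElem_range]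
    rw [windowCount]

-- the fold over the wanted items, with a generalized starting column
theorem okFold_eq (discount : List String) (m : Nat) (hm : m + 9 ≤ discount.length) :
    ∀ (items : List (String × Int)) (h : Nat → Bool),
    items.foldl (fun ok p =>
        let pref := (prefCounts p.1 discount).1
        (ok.zip (pref.zip (pref.drop 10))).map
          (fun q => q.1 && decide (p.2 ≤ q.2.2 - q.2.1))) ((List.range m).map h) =
    (List.range m).map (fun s =>
      items.foldl (fun b p => b && decide (p.2 ≤ (((discount.drop s).take 10).count p.1 : Int))) (h s)) := by
  intro items
  induction items with
  | nil => intro h; simp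
  | cons p items ih =>
    intro h
    simp only [List.foldl_cons]
    rw [okStep_eq m h p.1 p.2 discount hm, ih]

-- A's inner requirement check equals B's boolean fold
theorem inner_eq (w : List String) :
    ∀ (items : List (String × Int)) (b : Bool),
    items.foldl (fun ok p => if ((PySem.Dict.counter w).getD p.1 0) < p.2 then false else ok) b =
    items.foldl (fun ok p => ok && decide (p.2 ≤ ((w.count p.1 : Int)))) b := by
  intro items
  induction items with
  | nil => intro b; rfl
  | cons p items ih =>
    intro b
    rw [List.foldl_cons, List.foldl_cons, ih]
    congr 1
    rw [PySem.Dict.getD_counter]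
    by_cases hc : ((w.count p.1 : Int)) < p.2
    · simp [hc, not_le.mpr hc]
    · simp [hc, not_lt.mp hc]

theorem solution_eq_alt (want : List String) (number : List Int) (discount : List String) :
    solution want number discount = solution_alt want number discount := by
  unfold solution solution_alt
  by_cases hn : discount.length < 10
  · rw [PySem.List.pyRange_one_eq_nil (by omega)]
    simp [hn]
  · simp only [if_neg hn]
    have hrep : List.replicate (discount.length - 9) true
        = (List.range (discount.length - 9)).map (fun _ => true) := by
      rw [List.map_const', List.length_range]
    rw [hrep, okFold_eq discount (discount.length - 9) (by omega)]
    rw [List.map_map]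
    simp only [Function.comp_def]
    rw [PySem.List.sum_map_ite_one_zero]
    rw [PySem.List.foldl_if_add_one]
    rw [PySem.List.pyRange_one, List.countP_map]
    have hm : ((discount.length : Int) - 10 + 1 - 0).toNat = discount.length - 9 := by omega
    rw [hm, zero_add]
    apply congrArg
    apply List.countP_congr
    intro s hs
    simp only [List.mem_range] at hs
    simp only [Function.comp_apply, zero_add]
    rw [inner_eq]
    have hsl : PySem.List.slice discount (some (s : Int)) (some ((s : Int) + 10))
        = (discount.drop s).take 10 := by
      have h10 : ((s : Int) + 10) = (((s + 10 : Nat)) : Int) := by push_cast; ring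
      rw [h10, PySem.List.slice_natCast]
      congr 1
      omega
    rw [hsl]

-- ===== VERDICT (by name: the statement is the Claim_ definition above) =====
theorem solution_spec : Claim_equal_solution := by
  intro want number discount _
  unfold Spec_solution
  exact solution_eq_alt want number discount
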